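-- pv_equiv track=rewrite | github.com/Erne1357/itcj | itcj/core/utils/role_home.py | role_home
-- ===== SOURCE A (Python) =====
-- def role_home(roles) -> str:
--     """
--     Determina la ruta home basada en el rol de mayor prioridad del usuario.
--
--     Args:
--         roles: Puede ser un string (rol único) o un set/list de strings (múltiples roles)
--
--     Returns:
--         str: URL de la página home correspondiente al rol de mayor prioridad
--     """
--
--     # Jerarquía de roles ordenada por prioridad (mayor a menor)
--     ROLE_PRIORITY = [
--         "admin",           # Máxima prioridad
--         "staff",
--         "coordinator",
--         "social_service",
--         "student"          # Menor prioridad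
--     ]
--
--     # Mapeo de roles a rutas home
--     ROLE_ROUTES = {
--         "admin": "/itcj/dashboard",
--         "staff": "/itcj/dashboard",
--         "coordinator": "/itcj/dashboard",
--         "social_service": "/itcj/dashboard",
--         "student": "/agendatec/student/home"
--     }
--
--     # Convertir a set si es string individual
--     if isinstance(roles, str):
--         user_roles = {roles}
--     else:
--         user_roles = set(roles)
--
--     # Si no tiene roles, ir a home general
--     if not user_roles:
--         return "/"
--
--     # Buscar el rol de mayor prioridad que tenga el usuario
--     for role in ROLE_PRIORITY:
--         if role in user_roles:
--             return ROLE_ROUTES.get(role, "/")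
--
--     # Si solo tiene rol de student, ir a AgendaTec
--     if user_roles == {"student"}:
--         return "/agendatec/student/home"
--
--     # Si tiene otros roles no reconocidos o combinación con student, ir a dashboard ITCJ
--     return "/itcj/dashboard"
-- ===== SOURCE B (Python) =====
-- def role_home(roles) -> str:
--     # One pass: fold the maximum "priority score" over the roles (no set is built),
--     # then map the score straight to a route via a table.
--     best = -1
--     for r in ([roles] if isinstance(roles, str) else roles):
--         s = 2 if r in ("admin", "staff", "coordinator", "social_service") else (1 if r == "student" else 0)
--         if s > best:
--             best = s
--     return ("/", "/itcj/dashboard", "/agendatec/student/home", "/itcj/dashboard")[best + 1]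
-- ===== Notes on version B (the rewrite author's own statement) =====
-- stated objective: alternative
-- what changed: Replaces A's set construction plus ordered priority-list scan with a single fold computing the maximum numeric priority score over the roles, then one table lookup from score to route.
import Mathlib
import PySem

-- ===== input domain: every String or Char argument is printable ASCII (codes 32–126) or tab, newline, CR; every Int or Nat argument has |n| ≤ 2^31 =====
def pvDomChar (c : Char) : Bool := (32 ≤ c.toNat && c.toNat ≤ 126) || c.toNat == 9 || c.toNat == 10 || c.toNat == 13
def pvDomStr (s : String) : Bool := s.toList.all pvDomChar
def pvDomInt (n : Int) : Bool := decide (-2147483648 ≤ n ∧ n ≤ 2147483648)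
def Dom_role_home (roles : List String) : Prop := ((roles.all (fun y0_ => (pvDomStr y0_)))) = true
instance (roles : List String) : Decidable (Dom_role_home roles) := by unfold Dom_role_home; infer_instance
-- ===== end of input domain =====

-- B replaces A's set construction and ordered priority scan by a single fold computing
-- the maximum priority score over the roles, then one table lookup — objective: alternative.

-- ===== PORT A =====
def rolePriorityA : List String :=
  ["admin", "staff", "coordinator", "social_service", "student"]

def roleRoutesA : PySem.Dict String String :=
  PySem.Dict.ofList [("admin", "/itcj/dashboard"), ("staff", "/itcj/dashboard"),
   ("coordinator", "/itcj/dashboard"), ("social_service", "/itcj/dashboard"),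
   ("student", "/agendatec/student/home")]

-- the 'for role in ROLE_PRIORITY' loop: first priority role present, its route
def roleLoopA (userRoles : PySem.Set String) : List String → Option String
  | [] => none
  | r :: rest =>
      if PySem.Set.contains userRoles r then some (PySem.Dict.getD roleRoutesA r "/")
      else roleLoopA userRoles rest

def role_home (roles : List String) : String :=
  let userRoles : PySem.Set String := PySem.Set.ofList roles
  if userRoles = [] then "/"
  else
    match roleLoopA userRoles rolePriorityA with
    | some route => route
    | none =>
        if PySem.Set.equal userRoles (PySem.Set.ofList ["student"]) then "/agendatec/student/home"
        else "/itcj/dashboard"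

-- ===== PORT B =====
-- score of one role: 2 for the four dashboard roles, 1 for student, 0 otherwise
def scoreB (r : String) : Int :=
  if (["admin", "staff", "coordinator", "social_service"] : List String).contains r then 2
  else if r == "student" then 1 else 0

-- the 'for r in roles' loop folding the maximum score into best
def bestLoopB (best : Int) : List String → Int
  | [] => best
  | r :: rest => bestLoopB (if scoreB r > best then scoreB r else best) rest

def routeTableB : List String :=
  ["/", "/itcj/dashboard", "/agendatec/student/home", "/itcj/dashboard"]

def role_home_alt (roles : List String) : String :=
  let best := bestLoopB (-1) roles
  -- tuple index best+1 is always in range (best ∈ [-1,2]), so pyGet? never returns none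
  (PySem.List.pyGet? routeTableB (best + 1)).getD "/"

-- ===== PRECONDITION & SPEC =====
def Spec_role_home (roles : List String) (out : String) : Prop := out = role_home_alt roles
instance (roles : List String) (out : String) : Decidable (Spec_role_home roles out) := by unfold Spec_role_home; infer_instance

-- ===== CLAIM (what is proved, stated in full; the proofs are below) =====
def Claim_equal_role_home : Prop := ∀ (roles : List String), Dom_role_home roles → Spec_role_home roles (role_home roles)

-- ===== LEMMAS AND PROOFS =====

lemma scoreB_nonneg (r : String) : 0 ≤ scoreB r := by
  unfold scoreB; split_ifs <;> norm_num

lemma bestLoopB_ge (b : Int) (l : List String) : b ≤ bestLoopB b l := by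
  induction l generalizing b with
  | nil => simp [bestLoopB]
  | cons r rest ih =>
      simp only [bestLoopB]
      split_ifs with h
      · exact le_trans (le_of_lt h) (ih _)
      · exact ih _

lemma bestLoopB_mem_le (l : List String) (r : String) (hr : r ∈ l) :
    ∀ b, scoreB r ≤ bestLoopB b l := by
  induction l with
  | nil => cases hr
  | cons x rest ih =>
      intro b
      simp only [bestLoopB]
      rcases List.mem_cons.1 hr with h | h
      · subst h
        split_ifs with hx
        · exact bestLoopB_ge _ _
        · exact le_trans (not_lt.1 hx) (bestLoopB_ge _ _)
      · exact ih h _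

lemma bestLoopB_ub (c : Int) (l : List String) (h : ∀ r ∈ l, scoreB r ≤ c) :
    ∀ b, b ≤ c → bestLoopB b l ≤ c := by
  induction l with
  | nil => intro b hb; simpa [bestLoopB] using hb
  | cons x rest ih =>
      intro b hb
      simp only [bestLoopB]
      split_ifs with hx
      · exact ih (fun r hr => h r (List.mem_cons_of_mem _ hr)) _ (h x (by simp))
      · exact ih (fun r hr => h r (List.mem_cons_of_mem _ hr)) _ hb

lemma scoreB_eq_two_iff (r : String) :
    scoreB r = 2 ↔ (r = "admin" ∨ r = "staff" ∨ r = "coordinator" ∨ r = "social_service") := by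
  unfold scoreB; split_ifs with h1 h2 <;> simp_all

lemma scoreB_le_one (r : String)
    (h : ¬(r = "admin" ∨ r = "staff" ∨ r = "coordinator" ∨ r = "social_service")) :
    scoreB r ≤ 1 := by
  unfold scoreB; split_ifs <;> simp_all

lemma scoreB_le_zero (r : String)
    (h : ¬(r = "admin" ∨ r = "staff" ∨ r = "coordinator" ∨ r = "social_service"))
    (hst : r ≠ "student") : scoreB r ≤ 0 := by
  unfold scoreB; split_ifs <;> simp_all

-- best score when one of the four dashboard roles is present
lemma best_of_four (roles : List String)
    (h : "admin" ∈ roles ∨ "staff" ∈ roles ∨ "coordinator" ∈ roles ∨ "social_service" ∈ roles) :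
    bestLoopB (-1) roles = 2 := by
  have hub : bestLoopB (-1) roles ≤ 2 := by
    refine bestLoopB_ub 2 roles (fun r _ => ?_) (-1) (by norm_num)
    unfold scoreB; split_ifs <;> norm_num
  have hge : 2 ≤ bestLoopB (-1) roles := by
    rcases h with h | h | h | h <;>
      exact le_trans (le_of_eq ((scoreB_eq_two_iff _).2 (by simp)).symm)
        (bestLoopB_mem_le roles _ h (-1))
  omega

-- best score when student is present and none of the four
lemma best_of_student (roles : List String) (hst : "student" ∈ roles)
    (h1 : "admin" ∉ roles) (h2 : "staff" ∉ roles) (h3 : "coordinator" ∉ roles)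
    (h4 : "social_service" ∉ roles) : bestLoopB (-1) roles = 1 := by
  have hub : bestLoopB (-1) roles ≤ 1 := by
    refine bestLoopB_ub 1 roles (fun r hr => ?_) (-1) (by norm_num)
    refine scoreB_le_one r (fun hc => ?_)
    rcases hc with h | h | h | h <;> subst h <;> tauto
  have hge : (1 : Int) ≤ bestLoopB (-1) roles := by
    have hsc : scoreB "student" = 1 := by decide
    exact hsc ▸ bestLoopB_mem_le roles _ hst (-1)
  omega

-- best score when none of the five recognized roles is present (roles nonempty)
lemma best_of_other (roles : List String) (hne : roles ≠ [])
    (h1 : "admin" ∉ roles) (h2 : "staff" ∉ roles) (h3 : "coordinator" ∉ roles)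
    (h4 : "social_service" ∉ roles) (h5 : "student" ∉ roles) :
    bestLoopB (-1) roles = 0 := by
  have hub : bestLoopB (-1) roles ≤ 0 := by
    refine bestLoopB_ub 0 roles (fun r hr => ?_) (-1) (by norm_num)
    refine scoreB_le_zero r (fun hc => ?_) (fun hc => ?_)
    · rcases hc with h | h | h | h <;> subst h <;> tauto
    · subst hc; tauto
  have hge : (0 : Int) ≤ bestLoopB (-1) roles := by
    rcases List.exists_mem_of_ne_nil roles hne with ⟨x, hx⟩
    exact le_trans (scoreB_nonneg x) (bestLoopB_mem_le roles _ hx (-1))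
  omega

-- routes of A's literal dict and B's literal table, evaluated once
lemma routeA_admin : PySem.Dict.getD roleRoutesA "admin" "/" = "/itcj/dashboard" := by decide
lemma routeA_staff : PySem.Dict.getD roleRoutesA "staff" "/" = "/itcj/dashboard" := by decide
lemma routeA_coordinator : PySem.Dict.getD roleRoutesA "coordinator" "/" = "/itcj/dashboard" := by decide
lemma routeA_social : PySem.Dict.getD roleRoutesA "social_service" "/" = "/itcj/dashboard" := by decide
lemma routeA_student : PySem.Dict.getD roleRoutesA "student" "/" = "/agendatec/student/home" := by decide
lemma tblB_two : (PySem.List.pyGet? routeTableB (3 : Int)).getD "/" = "/itcj/dashboard" := by decide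
lemma tblB_one : (PySem.List.pyGet? routeTableB (2 : Int)).getD "/" = "/agendatec/student/home" := by decide
lemma tblB_zero : (PySem.List.pyGet? routeTableB (1 : Int)).getD "/" = "/itcj/dashboard" := by decide

-- ===== VERDICT (by name: the statement is the Claim_ definition above) =====
theorem role_home_spec : Claim_equal_role_home := by
  intro roles _
  unfold Spec_role_home role_home
  set s : PySem.Set String := PySem.Set.ofList roles with hs
  by_cases hnil : roles = []
  · subst hnil
    simp [hs, PySem.Set.ofList, role_home_alt, bestLoopB, routeTableB, PySem.List.pyGet?,
      PySem.List.pyIdx?]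
  · have hsne : s ≠ [] := by
      rcases List.exists_mem_of_ne_nil roles hnil with ⟨x, hx⟩
      intro h
      have hxs : x ∈ s := hs ▸ (PySem.Set.mem_ofList roles x).2 hx
      rw [h] at hxs; simp at hxs
    have hC : ∀ x : String, PySem.Set.contains s x = decide (x ∈ roles) := by
      intro x
      by_cases hx : x ∈ roles
      · have hxs : x ∈ s := hs ▸ (PySem.Set.mem_ofList roles x).2 hx
        simp [hx, hxs]
      · have hns : x ∉ s := fun hm => hx ((PySem.Set.mem_ofList roles x).1 (hs ▸ hm))
        have hcf : PySem.Set.contains s x ≠ true := fun hc => hns ((PySem.Set.contains_iff s x).1 hc)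
        simp [hx]; simpa using hcf
    simp only [if_neg hsne, roleLoopA, rolePriorityA, hC]
    unfold role_home_alt
    by_cases h1 : "admin" ∈ roles
    · rw [best_of_four roles (by tauto)]
      simp [h1, routeA_admin, tblB_two]
    · by_cases h2 : "staff" ∈ roles
      · rw [best_of_four roles (by tauto)]
        simp [h1, h2, routeA_staff, tblB_two]
      · by_cases h3 : "coordinator" ∈ roles
        · rw [best_of_four roles (by tauto)]
          simp [h1, h2, h3, routeA_coordinator, tblB_two]
        · by_cases h4 : "social_service" ∈ roles
          · rw [best_of_four roles (by tauto)]
            simp [h1, h2, h3, h4, routeA_social, tblB_two]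
          · by_cases h5 : "student" ∈ roles
            · rw [best_of_student roles h5 h1 h2 h3 h4]
              simp [h1, h2, h3, h4, h5, routeA_student, tblB_one]
            · rw [best_of_other roles hnil h1 h2 h3 h4 h5]
              have heq : PySem.Set.equal s (PySem.Set.ofList ["student"]) ≠ true := by
                intro hE
                rcases List.exists_mem_of_ne_nil roles hnil with ⟨x, hx⟩
                have hxs : x ∈ s := hs ▸ (PySem.Set.mem_ofList roles x).2 hx
                have hmem := (((PySem.Set.equal_iff s (PySem.Set.ofList ["student"])).1 hE) x).1 hxs
                simp [PySem.Set.mem_ofList] at hmem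
                exact h5 (hmem ▸ hx)
              simp [h1, h2, h3, h4, h5, heq, tblB_zero]
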